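-- pv_equiv track=rewrite | github.com/sinlesscoder/MageAI-ETL-Pipeline | src/mock_interviews/python/String_Anagrams.py | number_anagrams_v4
-- ===== SOURCE A (Python) =====
-- from collections import Counter
--
-- def is_anagram(word_one, word_two):
--     return Counter(word_one) == Counter(word_two)
--
-- def number_anagrams_v4(words: list, target: str) -> int:
--     # Counter
--     counter = 0
--
--     for word in words:
--         if len(word) != len(target):
--             continue
--         else:
--             if is_anagram(word, target) == True:
--                 counter += 1
--
--     return counter
-- ===== SOURCE B (Python) =====
-- def number_anagrams_v4(words: list, target: str) -> int:
--     # sort-based anagram signature: precompute sorted(target) once, count matches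
--     sig = sorted(target)
--     return sum(1 for w in words if sorted(w) == sig)
-- ===== Notes on version B (the rewrite author's own statement) =====
-- stated objective: idiomatic
-- what changed: Replaces the per-word Counter frequency-map comparison (with a length guard) by a precomputed sorted-character signature of target compared against sorted(word), counted in a single comprehension.
import Mathlib
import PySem

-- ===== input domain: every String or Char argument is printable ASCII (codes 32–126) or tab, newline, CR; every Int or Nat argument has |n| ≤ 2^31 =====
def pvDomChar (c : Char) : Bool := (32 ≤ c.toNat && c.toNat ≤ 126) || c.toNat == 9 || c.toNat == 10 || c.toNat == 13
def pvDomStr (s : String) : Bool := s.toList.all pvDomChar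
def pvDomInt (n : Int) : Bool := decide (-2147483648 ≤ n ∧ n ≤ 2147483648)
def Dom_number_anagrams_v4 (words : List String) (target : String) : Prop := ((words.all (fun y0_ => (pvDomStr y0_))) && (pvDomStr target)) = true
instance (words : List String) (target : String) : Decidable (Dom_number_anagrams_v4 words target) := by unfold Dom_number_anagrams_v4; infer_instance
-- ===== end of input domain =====

-- B replaces A's per-word Counter comparison by a precomputed sorted-character signature (idiomatic; same result everywhere).

-- ===== PORT A =====
-- Counter(w1) == Counter(w2): dict equality ignores insertion order, so it is ported as
-- "every key of c1 has the same value in c2, and every key of c2 is a key of c1"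
def is_anagram (word_one word_two : String) : Bool :=
  let c1 := PySem.Dict.counter word_one.toList
  let c2 := PySem.Dict.counter word_two.toList
  (c1.keys.all (fun k => c2.getD k 0 == c1.getD k 0)) &&
  (c2.keys.all (fun k => c1.contains k))

def number_anagrams_v4 (words : List String) (target : String) : Int :=
  words.foldl (fun counter word =>
    if PySem.Str.len word ≠ PySem.Str.len target then counter
    else if is_anagram word target = true then counter + 1 else counter) 0

-- ===== PORT B =====
def number_anagrams_v4_alt (words : List String) (target : String) : Int :=
  let sig := PySem.List.sorted target.toList (fun x => x) false
  ((words.countP (fun w => PySem.List.sorted w.toList (fun x => x) false == sig)) : Int)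

-- ===== PRECONDITION & SPEC =====
def Spec_number_anagrams_v4 (words : List String) (target : String) (out : Int) : Prop := out = number_anagrams_v4_alt words target
instance (words : List String) (target : String) (out : Int) : Decidable (Spec_number_anagrams_v4 words target out) := by unfold Spec_number_anagrams_v4; infer_instance

-- ===== CLAIM (what is proved, stated in full; the proofs are below) =====
def Claim_equal_number_anagrams_v4 : Prop := ∀ (words : List String) (target : String), Dom_number_anagrams_v4 words target → Spec_number_anagrams_v4 words target (number_anagrams_v4 words target)

-- ===== LEMMAS AND PROOFS =====

-- Counter-equality test succeeds exactly on permutations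
lemma is_anagram_iff_perm (w t : String) :
    is_anagram w t = true ↔ w.toList.Perm t.toList := by
  unfold is_anagram
  simp only [Bool.and_eq_true, List.all_eq_true, beq_iff_eq,
    PySem.Dict.keys_counter, PySem.Dict.getD_counter, PySem.Dict.contains_counter]
  constructor
  · rintro ⟨h1, h2⟩
    rw [List.perm_iff_count]
    intro c
    by_cases hc : c ∈ w.toList
    · have := h1 c (by simpa [PySem.Set.mem_ofList] using hc)
      exact_mod_cast this.symm
    · by_cases hct : c ∈ t.toList
      · have := h2 c (by simpa [PySem.Set.mem_ofList] using hct)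
        simp at this
        exact absurd this hc
      · simp [List.count_eq_zero_of_not_mem, hc, hct]
  · intro hp
    have hcnt := List.perm_iff_count.mp hp
    constructor
    · intro k _
      exact_mod_cast (hcnt k).symm
    · intro k hk
      simp only [PySem.Set.mem_ofList] at hk
      simpa using (hp.mem_iff).mpr hk

lemma len_test (w t : String) :
    PySem.Str.len w = PySem.Str.len t ↔ w.toList.length = t.toList.length := by
  simp [PySem.Str.len_eq]

-- A's per-word test (length guard + Counter comparison) agrees with B's sorted-signature test
lemma hfun_eq (target : String) (acc : Int) (w : String) :
    (if PySem.Str.len w ≠ PySem.Str.len target then acc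
     else if is_anagram w target = true then acc + 1 else acc) =
    (if (PySem.List.sorted w.toList (fun x => x) false ==
         PySem.List.sorted target.toList (fun x => x) false) = true then acc + 1 else acc) := by
  by_cases hperm : w.toList.Perm target.toList
  · have hs : PySem.List.sorted w.toList (fun x => x) false =
        PySem.List.sorted target.toList (fun x => x) false :=
      (PySem.List.sorted_id_eq_sorted_id_iff_perm _ _).mpr hperm
    have hlen : ¬ PySem.Str.len w ≠ PySem.Str.len target := by
      rw [not_not, len_test]
      exact hperm.length_eq
    have hana : is_anagram w target = true := (is_anagram_iff_perm w target).mpr hperm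
    have hb : (PySem.List.sorted w.toList (fun x => x) false ==
        PySem.List.sorted target.toList (fun x => x) false) = true := by
      rw [beq_iff_eq]; exact hs
    rw [if_neg hlen, if_pos hana, if_pos hb]
  · have hs : ¬ ((PySem.List.sorted w.toList (fun x => x) false ==
        PySem.List.sorted target.toList (fun x => x) false) = true) := by
      simpa [PySem.List.sorted_id_eq_sorted_id_iff_perm _ _] using hperm
    rw [if_neg hs]
    by_cases hl : PySem.Str.len w ≠ PySem.Str.len target
    · rw [if_pos hl]
    · have hana : ¬ is_anagram w target = true := fun h =>
        hperm ((is_anagram_iff_perm w target).mp h)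
      rw [if_neg hl, if_neg hana]

-- ===== VERDICT (by name: the statement is the Claim_ definition above) =====
theorem number_anagrams_v4_spec : Claim_equal_number_anagrams_v4 := by
  intro words target _
  unfold Spec_number_anagrams_v4 number_anagrams_v4 number_anagrams_v4_alt
  calc words.foldl (fun counter word =>
        if PySem.Str.len word ≠ PySem.Str.len target then counter
        else if is_anagram word target = true then counter + 1 else counter) (0 : Int)
      = words.foldl (fun acc w =>
          if (PySem.List.sorted w.toList (fun x => x) false ==
              PySem.List.sorted target.toList (fun x => x) false) = true then acc + 1 else acc) (0 : Int) :=
        PySem.List.foldl_congr_mem _ _ _ _ (fun acc x _ => hfun_eq target acc x)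
    _ = _ := by
        rw [PySem.List.foldl_if_add_one]
        simp
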